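-- pv_equiv track=rewrite | github.com/joaoavf/connect-x | kaggle/iebot_v1_1_submission.py | get_row_summary
-- ===== SOURCE A (Python) =====
-- def get_row_summary(row):
--     """Analyses the status of a given horizontal row.
--
--     Parameters:
--     row (List): Row of a Connect4 Game mapped by (0: Empty, 1: Player 1, 2: Player 2)
--
--     Returns:
--     List[max_count (int)              : max count achieved by horizontal sequence in this row,
--          max_end_position (int)       : end position for the max count find]"""
--
--     previous_cell_value, max_count, max_end_position, current_count = 0, 0, 0, 0
--
--     for cell_position, cell_value in enumerate(row):
--         if cell_value <= 0:
--             current_count = 0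
--         elif cell_value == previous_cell_value:
--             current_count += 1
--         else:
--             previous_cell_value = cell_value
--             current_count = 1
--
--         if current_count > max_count:
--             max_count, max_end_position = current_count, cell_position
--
--     return [max_count, max_end_position]
-- ===== SOURCE B (Python) =====
-- def get_row_summary(row):
--     """Run-based rewrite: scan maximal runs of equal cells instead of per-cell state."""
--     best_count, best_end = 0, 0
--     i, n = 0, len(row)
--     while i < n:
--         j = i + 1
--         while j < n and row[j] == row[i]:
--             j += 1
--         if row[i] > 0 and j - i > best_count:
--             best_count, best_end = j - i, j - 1
--         i = j
--     return [best_count, best_end]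
-- ===== Notes on version B (the rewrite author's own statement) =====
-- stated objective: alternative
-- what changed: Replaced A's per-cell state machine (previous value / current count carried across every cell) by an index-based scan over maximal runs of equal cells that considers each run once.
import Mathlib
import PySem

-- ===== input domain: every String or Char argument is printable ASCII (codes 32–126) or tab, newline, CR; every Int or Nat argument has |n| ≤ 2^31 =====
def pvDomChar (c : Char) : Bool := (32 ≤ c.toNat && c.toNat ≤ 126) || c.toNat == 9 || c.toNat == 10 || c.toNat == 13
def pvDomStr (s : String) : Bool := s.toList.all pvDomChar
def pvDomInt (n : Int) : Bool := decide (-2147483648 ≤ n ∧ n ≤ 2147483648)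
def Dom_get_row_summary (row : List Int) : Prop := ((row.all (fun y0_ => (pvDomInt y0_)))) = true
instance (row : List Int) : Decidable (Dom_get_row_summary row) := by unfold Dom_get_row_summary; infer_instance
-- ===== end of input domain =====

-- B replaces A's per-cell previous-value/current-count state machine by a scan over maximal
-- runs of equal cells (objective: alternative decomposition, same O(n) cost).

-- ===== PORT A =====
-- one iteration of A's for-loop: state (previous_cell_value, max_count, max_end_position, current_count)
def stepA : (Int × Int × Int × Int) → (Int × Int) → (Int × Int × Int × Int)
  | (prev, maxc, maxe, cur), (pos, v) =>
    let pc : Int × Int :=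
      if v ≤ 0 then (prev, 0)
      else if v = prev then (prev, cur + 1)
      else (v, 1)
    if pc.2 > maxc then (pc.1, pc.2, pos, pc.2) else (pc.1, maxc, maxe, pc.2)

def get_row_summary (row : List Int) : List Int :=
  let st := (PySem.List.enumerate row).foldl stepA (0, 0, 0, 0)
  [st.2.1, st.2.2.1]

-- ===== PORT B =====
-- the inner `while j < n and row[j] == row[i]` loop: how many further cells continue the run
def runLen (v : Int) : List Int → Nat
  | [] => 0
  | y :: ys => if y = v then runLen v ys + 1 else 0

-- the outer while-loop of B: i = absolute index of the first cell of the current run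
def altGo : List Int → Int → Int → Int → List Int
  | [], _, bc, be => [bc, be]
  | x :: xs, i, bc, be =>
    let k := runLen x xs
    let len : Int := (k : Int) + 1
    if x > 0 ∧ len > bc then altGo (xs.drop k) (i + len) len (i + len - 1)
    else altGo (xs.drop k) (i + len) bc be
  termination_by xs => xs.length
  decreasing_by all_goals (simp only [List.length_drop, List.length_cons]; omega)

def get_row_summary_alt (row : List Int) : List Int := altGo row 0 0 0

-- ===== PRECONDITION & SPEC =====
def Spec_get_row_summary (row : List Int) (out : List Int) : Prop := out = get_row_summary_alt row
instance (row : List Int) (out : List Int) : Decidable (Spec_get_row_summary row out) := by unfold Spec_get_row_summary; infer_instance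

-- ===== CLAIM (what is proved, stated in full; the proofs are below) =====
def Claim_equal_get_row_summary : Prop := ∀ (row : List Int), Dom_get_row_summary row → Spec_get_row_summary row (get_row_summary row)

-- ===== LEMMAS AND PROOFS =====

-- A's loop, written with an explicit start position (afold xs p st = fold of stepA over enumerate(xs, p))
def afold (xs : List Int) (p : Int) (st : Int × Int × Int × Int) : Int × Int × Int × Int :=
  (PySem.List.enumerate xs p).foldl stepA st

lemma afold_nil (p : Int) (st : Int × Int × Int × Int) : afold [] p st = st := by
  simp [afold, PySem.List.enumerate_nil]

lemma afold_cons (x : Int) (xs : List Int) (p : Int) (st : Int × Int × Int × Int) :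
    afold (x :: xs) p st = afold xs (p + 1) (stepA st (p, x)) := by
  simp [afold, PySem.List.enumerate_cons]

lemma afold_append (as bs : List Int) (p : Int) (st : Int × Int × Int × Int) :
    afold (as ++ bs) p st = afold bs (p + as.length) (afold as p st) := by
  induction as generalizing p st with
  | nil => simp [afold_nil]
  | cons a as ih =>
      simp only [List.cons_append, afold_cons, ih, List.length_cons]
      push_cast
      ring_nf

lemma runLen_le (v : Int) (xs : List Int) : runLen v xs ≤ xs.length := by
  induction xs with
  | nil => simp [runLen]
  | cons y ys ih => simp only [runLen, List.length_cons]; split_ifs <;> omega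

lemma take_runLen (v : Int) (xs : List Int) :
    xs.take (runLen v xs) = List.replicate (runLen v xs) v := by
  induction xs with
  | nil => simp [runLen]
  | cons y ys ih =>
      simp only [runLen]
      split_ifs with h
      · subst h; simp [List.replicate_succ, ih]
      · simp

lemma head?_drop_runLen (v : Int) (xs : List Int) (h : Int)
    (hh : (xs.drop (runLen v xs)).head? = some h) : h ≠ v := by
  induction xs with
  | nil => simp [runLen] at hh
  | cons y ys ih =>
      by_cases hy : y = v
      · subst hy
        have hr : runLen y (y :: ys) = runLen y ys + 1 := by simp [runLen]
        rw [hr, List.drop_succ_cons] at hh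
        exact ih hh
      · simp only [runLen, if_neg hy, List.drop_zero, List.head?_cons, Option.some.injEq] at hh
        omega

-- folding A's step over a run of j copies of a positive value x, with prev already x and 0 ≤ c ≤ m
lemma afold_replicate_pos (x : Int) (hx : 0 < x) :
    ∀ (j : Nat) (p m e c : Int), c ≤ m →
      afold (List.replicate j x) p (x, m, e, c)
        = (x, max m (c + j), if c + (j : Int) > m then p + j - 1 else e, c + j) := by
  intro j
  induction j with
  | zero =>
      intro p m e c hc
      rw [List.replicate_zero, afold_nil]
      simp only [Nat.cast_zero, add_zero]
      rw [max_eq_left hc, if_neg (by omega)]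
  | succ j ih =>
      intro p m e c hc
      rw [List.replicate_succ, afold_cons]
      have hstep : stepA (x, m, e, c) (p, x)
          = if c + 1 > m then (x, c + 1, p, c + 1) else (x, m, e, c + 1) := by
        simp [stepA]; split_ifs <;> simp_all <;> omega
      rw [hstep]
      by_cases hcm : c + 1 > m
      · rw [if_pos hcm, ih (p + 1) (c + 1) p (c + 1) le_rfl]
        simp only [Prod.mk.injEq, true_and]
        push_cast
        refine ⟨by omega, ?_, by omega⟩
        split_ifs <;> omega
      · rw [if_neg hcm, ih (p + 1) m e (c + 1) (by omega)]
        simp only [Prod.mk.injEq, true_and]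
        push_cast
        refine ⟨by omega, ?_, by omega⟩
        split_ifs <;> omega

-- folding A's step over a run of a non-positive value leaves everything but current_count alone
lemma afold_replicate_nonpos (x : Int) (hx : x ≤ 0) :
    ∀ (j : Nat) (p prev m e : Int), 0 ≤ m →
      afold (List.replicate j x) p (prev, m, e, 0) = (prev, m, e, 0) := by
  intro j
  induction j with
  | zero => intro p prev m e hm; simp [afold_nil]
  | succ j ih =>
      intro p prev m e hm
      rw [List.replicate_succ, afold_cons]
      have hstep : stepA (prev, m, e, (0 : Int)) (p, x) = (prev, m, e, 0) := by
        simp [stepA, if_pos hx]; omega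
      rw [hstep, ih _ _ _ _ hm]

-- main invariant: A's loop from a reachable state computes what B's run scan computes
lemma main_inv :
    ∀ (n : Nat) (xs : List Int) (p prev m e c : Int),
      xs.length ≤ n → 0 ≤ m → c ≤ m →
      (c = 0 ∨ ∀ h, xs.head? = some h → h ≠ prev) →
      [(afold xs p (prev, m, e, c)).2.1, (afold xs p (prev, m, e, c)).2.2.1] = altGo xs p m e := by
  intro n
  induction n with
  | zero =>
      intro xs p prev m e c hlen hm hc hinv
      have hnil : xs = [] := List.eq_nil_of_length_eq_zero (by omega)
      subst hnil
      simp [afold_nil, altGo]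
  | succ n ih =>
      intro xs p prev m e c hlen hm hc hinv
      match xs with
      | [] => simp [afold_nil, altGo]
      | x :: rest =>
        set k := runLen x rest with hk
        have hsplit : x :: rest = (x :: List.replicate k x) ++ rest.drop k := by
          have ht := take_runLen x rest
          simp only [List.cons_append]
          rw [← hk] at ht
          rw [← ht, List.take_append_drop]
        have hklen : k ≤ rest.length := hk ▸ runLen_le x rest
        have hdroplen : (rest.drop k).length ≤ n := by
          simp only [List.length_drop]
          simp only [List.length_cons] at hlen
          omega
        have hdrophead : ∀ h, (rest.drop k).head? = some h → h ≠ x := by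
          intro h hh
          exact head?_drop_runLen x rest h (by rw [← hk]; exact hh)
        have haltB : altGo (x :: rest) p m e
            = if 0 < x ∧ ((k : Int) + 1) > m
              then altGo (rest.drop k) (p + ((k : Int) + 1)) ((k : Int) + 1) (p + ((k : Int) + 1) - 1)
              else altGo (rest.drop k) (p + ((k : Int) + 1)) m e := by
          rw [altGo]
        conv_lhs => rw [hsplit]
        rw [afold_append, haltB]
        simp only [List.length_cons, List.length_replicate]
        by_cases hx : 0 < x
        · -- positive run of length k+1
          have hc0 : x = prev → c = 0 := by
            intro hxp
            rcases hinv with h0 | hne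
            · exact h0
            · exact absurd hxp (hne x rfl)
          have hnx : ¬ x ≤ 0 := by omega
          have hstep1 : stepA (prev, m, e, c) (p, x)
              = if 1 > m then (x, 1, p, 1) else (x, m, e, 1) := by
            by_cases hxp : x = prev
            · have h0 := hc0 hxp
              subst h0
              subst hxp
              simp [stepA, hnx]
            · simp [stepA, hnx, hxp]
          rw [afold_cons, hstep1]
          push_cast
          by_cases hbig : m < (k : Int) + 1
          · rw [if_pos (show 0 < x ∧ ((k:Int) + 1) > m from ⟨hx, by omega⟩)]
            by_cases h1m : m < 1
            · rw [if_pos (show (1:Int) > m by omega),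
                 afold_replicate_pos x hx k (p + 1) 1 p 1 le_rfl]
              rw [show max (1:Int) (1 + (k:Int)) = (k:Int) + 1 by omega,
                  show (if 1 + (k : Int) > 1 then p + 1 + (k:Int) - 1 else p) = p + ((k:Int) + 1) - 1 by
                    split_ifs <;> omega]
              exact ih (rest.drop k) (p + ((k:Int) + 1)) x ((k:Int) + 1) (p + ((k:Int) + 1) - 1)
                (1 + k) hdroplen (by omega) (by omega) (Or.inr hdrophead)
            · rw [if_neg (show ¬ (1:Int) > m by omega),
                 afold_replicate_pos x hx k (p + 1) m e 1 (by omega)]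
              rw [show max m (1 + (k:Int)) = (k:Int) + 1 by omega,
                  show (if 1 + (k : Int) > m then p + 1 + (k:Int) - 1 else e) = p + ((k:Int) + 1) - 1 by
                    rw [if_pos (by omega)]; ring]
              exact ih (rest.drop k) (p + ((k:Int) + 1)) x ((k:Int) + 1) (p + ((k:Int) + 1) - 1)
                (1 + k) hdroplen (by omega) (by omega) (Or.inr hdrophead)
          · rw [if_neg (show ¬ (0 < x ∧ ((k:Int) + 1) > m) by rintro ⟨-, h2⟩; omega)]
            rw [if_neg (show ¬ (1:Int) > m by omega),
               afold_replicate_pos x hx k (p + 1) m e 1 (by omega)]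
            rw [show max m (1 + (k:Int)) = m by omega,
                show (if 1 + (k : Int) > m then p + 1 + (k:Int) - 1 else e) = e by
                  rw [if_neg (by omega)]]
            exact ih (rest.drop k) (p + ((k:Int) + 1)) x m e (1 + k) hdroplen hm (by omega)
              (Or.inr hdrophead)
        · -- non-positive run: the state only loses current_count
          have hx' : x ≤ 0 := by omega
          have hstep1 : stepA (prev, m, e, c) (p, x) = (prev, m, e, 0) := by
            simp [stepA, hx']
            omega
          rw [afold_cons, hstep1, afold_replicate_nonpos x hx' k (p + 1) prev m e hm]
          rw [if_neg (by intro hcon; exact hx hcon.1)]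
          push_cast
          exact ih (rest.drop k) (p + ((k:Int) + 1)) prev m e 0 hdroplen hm hm (Or.inl rfl)

-- ===== VERDICT (by name: the statement is the Claim_ definition above) =====
theorem get_row_summary_spec : Claim_equal_get_row_summary := by
  intro row _
  unfold Spec_get_row_summary get_row_summary get_row_summary_alt
  have := main_inv row.length row 0 0 0 0 0 le_rfl le_rfl le_rfl (Or.inl rfl)
  simpa [afold] using this
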